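-- pv_equiv track=rewrite | github.com/l-peron/ia02-helltaker | main.py | parsingInfos
-- ===== SOURCE A (Python) =====
-- from collections import namedtuple
-- from typing import Dict, List, Tuple, Callable, Set
--
-- State = namedtuple(
--     "state",
--     ("hero", "steps", "blocks", "key", "lock", "mobs", "safeTraps", "unsafeTraps"),
-- )
--
-- def parsingInfos(
--     grid: List[List[str]], maxstep: int, m: int, n: int
-- ) -> Tuple[Dict[str, set], State]:
--     hero = None
--     blocks = set()
--     key = None
--     lock = None
--     mobs = set()
--     safeTraps = set()
--     unsafeTraps = set()
--
--     map_rules = {"D": set(), "S": set(), "#": set()}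
--
--     for x in range(m):
--         for y in range(n):
--             if grid[x][y] == "#":
--                 map_rules["#"].add((x, y))
--             if grid[x][y] == "D":
--                 map_rules["D"].add((x, y))
--             if grid[x][y] == "S" or grid[x][y] == "O":
--                 map_rules["S"].add((x, y))
--             if grid[x][y] == "H":
--                 hero = (x, y)
--             if grid[x][y] in ["B", "P", "Q", "O"]:
--                 blocks.add((x, y))
--             if grid[x][y] in ["K"]:
--                 key = (x, y)
--             if grid[x][y] in ["L"]:
--                 lock = (x, y)
--             if grid[x][y] in ["M"]:
--                 mobs.add((x, y))
--             if grid[x][y] in ["T", "P"]: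
--                 safeTraps.add((x, y))
--             if grid[x][y] in ["U", "Q"]:
--                 unsafeTraps.add((x, y))
--
--     state = State(
--         hero,
--         maxstep,
--         frozenset(blocks),
--         key,
--         lock,
--         frozenset(mobs),
--         frozenset(safeTraps),
--         frozenset(unsafeTraps),
--     )
--
--     return map_rules, state
-- ===== SOURCE B (Python) =====
-- from collections import namedtuple
--
-- State = namedtuple(
--     "state",
--     ("hero", "steps", "blocks", "key", "lock", "mobs", "safeTraps", "unsafeTraps"),
-- )
--
-- def parsingInfos(grid, maxstep, m, n):
--     # One pass materialises a tagged cell list; every output is then a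
--     # declarative filter over it (no mutable accumulators, no per-cell if-chain).
--     cells = [(grid[x][y], (x, y)) for x in range(m) for y in range(n)]
--
--     def coords(chars):
--         return [c for ch, c in cells if ch in chars]
--
--     def last(chars):
--         cs = coords(chars)
--         return cs[-1] if cs else None
--
--     map_rules = {
--         "D": set(coords(("D",))),
--         "S": set(coords(("S", "O"))),
--         "#": set(coords(("#",))),
--     }
--     state = State(
--         last(("H",)),
--         maxstep,
--         frozenset(coords(("B", "P", "Q", "O"))),
--         last(("K",)),
--         last(("L",)),
--         frozenset(coords(("M",))),
--         frozenset(coords(("T", "P"))),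
--         frozenset(coords(("U", "Q"))),
--     )
--     return map_rules, state
-- ===== Notes on version B (the rewrite author's own statement) =====
-- stated objective: simpler
-- what changed: Replaces the imperative nested loop with ten mutable accumulators and a per-cell if-chain by one comprehension building a tagged cell list, from which every output is derived as a declarative filter (last element for hero/key/lock).
import Mathlib
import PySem

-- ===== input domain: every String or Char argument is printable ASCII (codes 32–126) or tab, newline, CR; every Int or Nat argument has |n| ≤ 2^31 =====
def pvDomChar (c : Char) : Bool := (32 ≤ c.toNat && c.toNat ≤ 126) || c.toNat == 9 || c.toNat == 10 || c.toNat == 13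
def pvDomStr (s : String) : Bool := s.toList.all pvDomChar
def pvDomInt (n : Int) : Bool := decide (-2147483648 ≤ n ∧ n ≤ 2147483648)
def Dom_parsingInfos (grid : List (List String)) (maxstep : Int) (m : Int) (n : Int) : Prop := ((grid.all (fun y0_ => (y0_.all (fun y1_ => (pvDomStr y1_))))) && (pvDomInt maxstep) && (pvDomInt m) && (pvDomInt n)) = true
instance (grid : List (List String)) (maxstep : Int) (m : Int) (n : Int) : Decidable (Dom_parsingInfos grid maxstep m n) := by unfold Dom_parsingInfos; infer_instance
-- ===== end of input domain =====

-- map_rules sets wallA/dA/sA; State fields hero..traps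
-- B replaces A's imperative nested loop with ten mutable accumulators by one tagged
-- cell list from which every output is a declarative filter (objective: simpler).

-- ===== PORT A =====
-- the ten mutable variables of A's loop body (map_rules' three sets kept as wallA/dA/sA)
structure PAState where
  heroA : Option (Int × Int)
  blocksA : PySem.Set (Int × Int)
  keyA : Option (Int × Int)
  lockA : Option (Int × Int)
  mobsA : PySem.Set (Int × Int)
  safeA : PySem.Set (Int × Int)
  unsA : PySem.Set (Int × Int)
  wallA : PySem.Set (Int × Int)
  dA : PySem.Set (Int × Int)
  sA : PySem.Set (Int × Int)
deriving Repr, DecidableEq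

-- grid[x][y]; Python raises IndexError out of range — Pre_ excludes exactly that, so "" is never the value inside Pre_
def pvCellA (grid : List (List String)) (x y : Int) : String :=
  ((PySem.List.pyGet? grid x).bind (fun row => PySem.List.pyGet? row y)).getD ""

-- the body of A's inner loop: the eleven ifs, in Python's order, each touching one variable
def pvStepA (grid : List (List String)) (st : PAState) (xy : Int × Int) : PAState :=
  let c := pvCellA grid xy.1 xy.2
  { wallA := if c == "#" then PySem.Set.add st.wallA xy else st.wallA,
    dA := if c == "D" then PySem.Set.add st.dA xy else st.dA,
    sA := if c == "S" || c == "O" then PySem.Set.add st.sA xy else st.sA,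
    heroA := if c == "H" then some xy else st.heroA,
    blocksA := if ["B", "P", "Q", "O"].contains c then PySem.Set.add st.blocksA xy else st.blocksA,
    keyA := if ["K"].contains c then some xy else st.keyA,
    lockA := if ["L"].contains c then some xy else st.lockA,
    mobsA := if ["M"].contains c then PySem.Set.add st.mobsA xy else st.mobsA,
    safeA := if ["T", "P"].contains c then PySem.Set.add st.safeA xy else st.safeA,
    unsA := if ["U", "Q"].contains c then PySem.Set.add st.unsA xy else st.unsA }

def parsingInfos (grid : List (List String)) (maxstep : Int) (m : Int) (n : Int) : (List (String × List (Int × Int))) × ((Option (Int × Int)) × Int × (List (Int × Int)) × (Option (Int × Int)) × (Option (Int × Int)) × (List (Int × Int)) × (List (Int × Int)) × (List (Int × Int))) :=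
  let init : PAState := ⟨none, [], none, none, [], [], [], [], [], []⟩
  let st := (PySem.List.pyRange 0 m 1).foldl
      (fun st x => (PySem.List.pyRange 0 n 1).foldl (fun st y => pvStepA grid st (x, y)) st) init
  ([("D", st.dA), ("S", st.sA), ("#", st.wallA)],
   (st.heroA, maxstep, st.blocksA, st.keyA, st.lockA, st.mobsA, st.safeA, st.unsA))

-- ===== PORT B =====
def pvCellB (grid : List (List String)) (x y : Int) : String :=
  ((PySem.List.pyGet? grid x).bind (fun row => PySem.List.pyGet? row y)).getD ""

-- cells = [(grid[x][y], (x, y)) for x in range(m) for y in range(n)]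
def pvCells (grid : List (List String)) (m n : Int) : List (String × (Int × Int)) :=
  (PySem.List.pyRange 0 m 1).flatMap
    (fun x => (PySem.List.pyRange 0 n 1).map (fun y => (pvCellB grid x y, (x, y))))

-- coords(chars) = [c for ch, c in cells if ch in chars]
def pvCoords (cells : List (String × (Int × Int))) (chars : List String) : List (Int × Int) :=
  (cells.filter (fun c => chars.contains c.1)).map (fun c => c.2)

-- last(chars) = coords(chars)[-1] if nonempty else None
def pvLast (cells : List (String × (Int × Int))) (chars : List String) : Option (Int × Int) :=
  (pvCoords cells chars).getLast?

def parsingInfos_alt (grid : List (List String)) (maxstep : Int) (m : Int) (n : Int) : (List (String × List (Int × Int))) × ((Option (Int × Int)) × Int × (List (Int × Int)) × (Option (Int × Int)) × (Option (Int × Int)) × (List (Int × Int)) × (List (Int × Int)) × (List (Int × Int))) :=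
  let cells := pvCells grid m n
  ([("D", PySem.Set.ofList (pvCoords cells ["D"])),
    ("S", PySem.Set.ofList (pvCoords cells ["S", "O"])),
    ("#", PySem.Set.ofList (pvCoords cells ["#"]))],
   (pvLast cells ["H"], maxstep,
    PySem.Set.ofList (pvCoords cells ["B", "P", "Q", "O"]),
    pvLast cells ["K"], pvLast cells ["L"],
    PySem.Set.ofList (pvCoords cells ["M"]),
    PySem.Set.ofList (pvCoords cells ["T", "P"]),
    PySem.Set.ofList (pvCoords cells ["U", "Q"])))

-- ===== PRECONDITION & SPEC =====
-- Pre_ excludes exactly the inputs where A's grid[x][y] raises IndexError: with both loop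
-- ranges nonempty, every x < m must index grid and every one of those rows must have length ≥ n.
def Pre_parsingInfos (grid : List (List String)) (maxstep : Int) (m : Int) (n : Int) : Prop :=
  m ≤ 0 ∨ n ≤ 0 ∨ (m ≤ (grid.length : Int) ∧ ∀ row ∈ grid.take m.toNat, n ≤ (row.length : Int))
instance (grid : List (List String)) (maxstep : Int) (m : Int) (n : Int) : Decidable (Pre_parsingInfos grid maxstep m n) := by unfold Pre_parsingInfos; infer_instance

def pvWitness_parsingInfos : List (List String) × Int × Int × Int := ([["#", "H"], ["K", "D"]], 10, 2, 2)

def Spec_parsingInfos (grid : List (List String)) (maxstep : Int) (m : Int) (n : Int) (out : (List (String × List (Int × Int))) × ((Option (Int × Int)) × Int × (List (Int × Int)) × (Option (Int × Int)) × (Option (Int × Int)) × (List (Int × Int)) × (List (Int × Int)) × (List (Int × Int)))) : Prop := out = parsingInfos_alt grid maxstep m n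
instance (grid : List (List String)) (maxstep : Int) (m : Int) (n : Int) (out : (List (String × List (Int × Int))) × ((Option (Int × Int)) × Int × (List (Int × Int)) × (Option (Int × Int)) × (Option (Int × Int)) × (List (Int × Int)) × (List (Int × Int)) × (List (Int × Int)))) : Decidable (Spec_parsingInfos grid maxstep m n out) := by
  unfold Spec_parsingInfos
  -- staged local instances: default instance search exceeds its depth on this 9-component product type
  have t1 : DecidableEq (List (Int × Int) × List (Int × Int)) := inferInstance
  have t2 : DecidableEq (List (Int × Int) × List (Int × Int) × List (Int × Int)) := inferInstance
  have t3 : DecidableEq (Option (Int × Int) × List (Int × Int) × List (Int × Int) × List (Int × Int)) := inferInstance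
  have t4 : DecidableEq (Option (Int × Int) × Option (Int × Int) × List (Int × Int) × List (Int × Int) × List (Int × Int)) := inferInstance
  have t5 : DecidableEq (List (Int × Int) × Option (Int × Int) × Option (Int × Int) × List (Int × Int) × List (Int × Int) × List (Int × Int)) := inferInstance
  have t6 : DecidableEq (Int × List (Int × Int) × Option (Int × Int) × Option (Int × Int) × List (Int × Int) × List (Int × Int) × List (Int × Int)) := inferInstance
  have t7 : DecidableEq ((Option (Int × Int)) × Int × List (Int × Int) × Option (Int × Int) × Option (Int × Int) × List (Int × Int) × List (Int × Int) × List (Int × Int)) := inferInstance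
  have t8 : DecidableEq (List (String × List (Int × Int))) := inferInstance
  exact instDecidableEqProd out (parsingInfos_alt grid maxstep m n)

-- ===== CLAIM (what is proved, stated in full; the proofs are below) =====
def Claim_equal_parsingInfos : Prop := ∀ (grid : List (List String)) (maxstep : Int) (m : Int) (n : Int), Dom_parsingInfos grid maxstep m n → Pre_parsingInfos grid maxstep m n → Spec_parsingInfos grid maxstep m n (parsingInfos grid maxstep m n)

-- ===== LEMMAS AND PROOFS =====

-- A's loop body with the cell character supplied from outside (pvStepA grid st xy unfolds to this)
def pvStepTag (st : PAState) (c : String × (Int × Int)) : PAState :=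
  { wallA := if c.1 == "#" then PySem.Set.add st.wallA c.2 else st.wallA,
    dA := if c.1 == "D" then PySem.Set.add st.dA c.2 else st.dA,
    sA := if c.1 == "S" || c.1 == "O" then PySem.Set.add st.sA c.2 else st.sA,
    heroA := if c.1 == "H" then some c.2 else st.heroA,
    blocksA := if ["B", "P", "Q", "O"].contains c.1 then PySem.Set.add st.blocksA c.2 else st.blocksA,
    keyA := if ["K"].contains c.1 then some c.2 else st.keyA,
    lockA := if ["L"].contains c.1 then some c.2 else st.lockA,
    mobsA := if ["M"].contains c.1 then PySem.Set.add st.mobsA c.2 else st.mobsA,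
    safeA := if ["T", "P"].contains c.1 then PySem.Set.add st.safeA c.2 else st.safeA,
    unsA := if ["U", "Q"].contains c.1 then PySem.Set.add st.unsA c.2 else st.unsA }

theorem pv_foldl_flatMap {α β γ : Type} (f : α → List β) (g : γ → β → γ) (L : List α) (init : γ) :
    (L.flatMap f).foldl g init = L.foldl (fun acc x => (f x).foldl g acc) init := by
  induction L generalizing init with
  | nil => rfl
  | cons a l ih => simp [List.flatMap_cons, List.foldl_append, ih]

theorem pv_nested_eq (grid : List (List String)) (m n : Int) (init : PAState) :
    (PySem.List.pyRange 0 m 1).foldl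
      (fun st x => (PySem.List.pyRange 0 n 1).foldl (fun st y => pvStepA grid st (x, y)) st) init
    = (pvCells grid m n).foldl pvStepTag init := by
  rw [pvCells, pv_foldl_flatMap]
  have hstep : (fun (st : PAState) (x : Int) =>
      (PySem.List.pyRange 0 n 1).foldl (fun st y => pvStepA grid st (x, y)) st)
      = (fun (acc : PAState) (x : Int) =>
      ((PySem.List.pyRange 0 n 1).map (fun y => (pvCellB grid x y, (x, y)))).foldl pvStepTag acc) := by
    funext st x
    rw [List.foldl_map]
    rfl
  rw [hstep]

-- per-field projections of the fold
theorem pv_fold_wall : ∀ (L : List (String × (Int × Int))) (st : PAState),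
    (L.foldl pvStepTag st).wallA
      = L.foldl (fun s c => if c.1 == "#" then PySem.Set.add s c.2 else s) st.wallA := by
  intro L; induction L with
  | nil => intro st; rfl
  | cons c l ih => intro st; simp only [List.foldl_cons, ih]; rfl

theorem pv_fold_d : ∀ (L : List (String × (Int × Int))) (st : PAState),
    (L.foldl pvStepTag st).dA
      = L.foldl (fun s c => if c.1 == "D" then PySem.Set.add s c.2 else s) st.dA := by
  intro L; induction L with
  | nil => intro st; rfl
  | cons c l ih => intro st; simp only [List.foldl_cons, ih]; rfl

theorem pv_fold_s : ∀ (L : List (String × (Int × Int))) (st : PAState),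
    (L.foldl pvStepTag st).sA
      = L.foldl (fun s c => if c.1 == "S" || c.1 == "O" then PySem.Set.add s c.2 else s) st.sA := by
  intro L; induction L with
  | nil => intro st; rfl
  | cons c l ih => intro st; simp only [List.foldl_cons, ih]; rfl

theorem pv_fold_hero : ∀ (L : List (String × (Int × Int))) (st : PAState),
    (L.foldl pvStepTag st).heroA
      = L.foldl (fun h c => if c.1 == "H" then some c.2 else h) st.heroA := by
  intro L; induction L with
  | nil => intro st; rfl
  | cons c l ih => intro st; simp only [List.foldl_cons, ih]; rfl

theorem pv_fold_blocks : ∀ (L : List (String × (Int × Int))) (st : PAState),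
    (L.foldl pvStepTag st).blocksA
      = L.foldl (fun s c => if ["B", "P", "Q", "O"].contains c.1 then PySem.Set.add s c.2 else s) st.blocksA := by
  intro L; induction L with
  | nil => intro st; rfl
  | cons c l ih => intro st; simp only [List.foldl_cons, ih]; rfl

theorem pv_fold_key : ∀ (L : List (String × (Int × Int))) (st : PAState),
    (L.foldl pvStepTag st).keyA
      = L.foldl (fun h c => if ["K"].contains c.1 then some c.2 else h) st.keyA := by
  intro L; induction L with
  | nil => intro st; rfl
  | cons c l ih => intro st; simp only [List.foldl_cons, ih]; rfl

theorem pv_fold_lock : ∀ (L : List (String × (Int × Int))) (st : PAState),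
    (L.foldl pvStepTag st).lockA
      = L.foldl (fun h c => if ["L"].contains c.1 then some c.2 else h) st.lockA := by
  intro L; induction L with
  | nil => intro st; rfl
  | cons c l ih => intro st; simp only [List.foldl_cons, ih]; rfl

theorem pv_fold_mobs : ∀ (L : List (String × (Int × Int))) (st : PAState),
    (L.foldl pvStepTag st).mobsA
      = L.foldl (fun s c => if ["M"].contains c.1 then PySem.Set.add s c.2 else s) st.mobsA := by
  intro L; induction L with
  | nil => intro st; rfl
  | cons c l ih => intro st; simp only [List.foldl_cons, ih]; rfl

theorem pv_fold_safe : ∀ (L : List (String × (Int × Int))) (st : PAState),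
    (L.foldl pvStepTag st).safeA
      = L.foldl (fun s c => if ["T", "P"].contains c.1 then PySem.Set.add s c.2 else s) st.safeA := by
  intro L; induction L with
  | nil => intro st; rfl
  | cons c l ih => intro st; simp only [List.foldl_cons, ih]; rfl

theorem pv_fold_unsafe : ∀ (L : List (String × (Int × Int))) (st : PAState),
    (L.foldl pvStepTag st).unsA
      = L.foldl (fun s c => if ["U", "Q"].contains c.1 then PySem.Set.add s c.2 else s) st.unsA := by
  intro L; induction L with
  | nil => intro st; rfl
  | cons c l ih => intro st; simp only [List.foldl_cons, ih]; rfl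

-- a guarded Set.add fold is the Set.ofList of the filtered coordinates
theorem pv_foldl_ite_add (p : String × (Int × Int) → Bool) :
    ∀ (L : List (String × (Int × Int))) (s : PySem.Set (Int × Int)),
    L.foldl (fun s c => if p c then PySem.Set.add s c.2 else s) s
      = ((L.filter p).map (fun c => c.2)).foldl PySem.Set.add s := by
  intro L; induction L with
  | nil => intro s; rfl
  | cons c l ih =>
    intro s
    by_cases h : p c <;> simp [h, ih]

theorem pv_getLast?_cons {α : Type} (a : α) (l : List α) :
    (a :: l).getLast? = l.getLast?.or (some a) := by
  induction l generalizing a with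
  | nil => rfl
  | cons b l ih => rw [List.getLast?_cons_cons, ih]; cases l.getLast? <;> rfl

-- a last-wins option fold is the getLast? of the filtered coordinates
theorem pv_foldl_ite_last (p : String × (Int × Int) → Bool) :
    ∀ (L : List (String × (Int × Int))) (h : Option (Int × Int)),
    L.foldl (fun h c => if p c then some c.2 else h) h
      = ((L.filter p).map (fun c => c.2)).getLast?.or h := by
  intro L; induction L with
  | nil => intro h; rfl
  | cons c l ih =>
    intro h
    by_cases hp : p c
    · simp only [List.foldl_cons, hp, if_pos, List.filter_cons_of_pos hp, List.map_cons, ih,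
        pv_getLast?_cons, Option.or_assoc, Option.some_or]
    · simp [hp, ih]

theorem pv_set_component (p : String × (Int × Int) → Bool) (chars : List String)
    (hp : ∀ c : String × (Int × Int), p c = chars.contains c.1)
    (L : List (String × (Int × Int))) :
    L.foldl (fun s c => if p c then PySem.Set.add s c.2 else s) []
      = PySem.Set.ofList (pvCoords L chars) := by
  have hfun : p = fun c : String × (Int × Int) => chars.contains c.1 := funext hp
  rw [pv_foldl_ite_add, pvCoords, PySem.Set.ofList_eq_foldl, hfun]

theorem pv_last_component (p : String × (Int × Int) → Bool) (chars : List String)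
    (hp : ∀ c : String × (Int × Int), p c = chars.contains c.1)
    (L : List (String × (Int × Int))) :
    L.foldl (fun h c => if p c then some c.2 else h) none = pvLast L chars := by
  have hfun : p = fun c : String × (Int × Int) => chars.contains c.1 := funext hp
  rw [pv_foldl_ite_last, pvLast, pvCoords, Option.or_none, hfun]

theorem pv_main (grid : List (List String)) (maxstep m n : Int) :
    parsingInfos grid maxstep m n = parsingInfos_alt grid maxstep m n := by
  dsimp only [parsingInfos, parsingInfos_alt]
  rw [pv_nested_eq]
  rw [pv_fold_wall, pv_fold_d, pv_fold_s, pv_fold_hero, pv_fold_blocks, pv_fold_key,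
    pv_fold_lock, pv_fold_mobs, pv_fold_safe, pv_fold_unsafe]
  rw [pv_set_component (fun c => c.1 == "#") ["#"]
      (by intro c; by_cases h : c.1 = "#" <;> simp [h]),
    pv_set_component (fun c => c.1 == "D") ["D"]
      (by intro c; by_cases h : c.1 = "D" <;> simp [h]),
    pv_set_component (fun c => c.1 == "S" || c.1 == "O") ["S", "O"]
      (by intro c; by_cases h : c.1 = "S" <;> by_cases h2 : c.1 = "O" <;> simp [h, h2]),
    pv_last_component (fun c => c.1 == "H") ["H"]
      (by intro c; by_cases h : c.1 = "H" <;> simp [h]),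
    pv_set_component (fun c => ["B", "P", "Q", "O"].contains c.1) ["B", "P", "Q", "O"] (fun c => rfl),
    pv_last_component (fun c => ["K"].contains c.1) ["K"] (fun c => rfl),
    pv_last_component (fun c => ["L"].contains c.1) ["L"] (fun c => rfl),
    pv_set_component (fun c => ["M"].contains c.1) ["M"] (fun c => rfl),
    pv_set_component (fun c => ["T", "P"].contains c.1) ["T", "P"] (fun c => rfl),
    pv_set_component (fun c => ["U", "Q"].contains c.1) ["U", "Q"] (fun c => rfl)]

-- ===== VERDICT (by name: the statement is the Claim_ definition above) =====
theorem parsingInfos_spec : Claim_equal_parsingInfos := by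
  intro grid maxstep m n _ _
  exact pv_main grid maxstep m n
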